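-- pv_equiv track=rewrite | github.com/Steffenhvid/CodeCompetition | Services/Various.py | obtain_max_number
-- ===== SOURCE A (Python) =====
-- from collections import Counter
--
-- def obtain_max_number(lst):
--     data = dict(Counter(lst))
--     while any(x > 1 for x in data.values()):
--         tmp =dict(data)
--         for key in data.keys():
--             if data[key] > 1:
--                 new_value = key*2
--                 tmp[new_value] = tmp.get(new_value, 0) + 1
--                 tmp[key] -= 2
--         data = tmp
--     return max([key for key in data.keys() if data[key] == 1])
-- ===== SOURCE B (Python) =====
-- def _split(x):
--     # factor out powers of two: x = odd * 2**e  (x must be nonzero)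
--     e = 0
--     while x % 2 == 0:
--         x //= 2
--         e += 1
--     return x, e
--
-- def obtain_max_number(lst):
--     # one pass: group counts as a binary number per odd part, then take
--     # each group's extremal surviving key directly (no simulation rounds)
--     groups = {}
--     has_zero = False
--     for x in lst:
--         if x == 0:
--             has_zero = True
--         else:
--             o, e = _split(x)
--             groups[o] = groups.get(o, 0) + 2 ** e
--     best = 0 if has_zero else None
--     for o, n in groups.items():
--         k = o * 2 ** (n.bit_length() - 1) if o > 0 else o * 2 ** _split(n)[1]
--         if best is None or k > best:
--             best = k
--     return best
-- ===== Notes on version B (the rewrite author's own statement) =====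
-- stated objective: faster
-- what changed: A repeatedly simulates merge rounds over a counting dict until no count exceeds 1; B makes one pass grouping each element's count weight 2^v2(x) by odd part, so each group's total is a binary number whose set bits are exactly the surviving keys, and takes each group's extremal bit in closed form (top bit for positive odd parts, lowest bit for negative ones, 0 special-cased).
-- outside the precondition, e.g. on obtain_max_number([]): A raises ValueError, B returns None
import Mathlib
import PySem

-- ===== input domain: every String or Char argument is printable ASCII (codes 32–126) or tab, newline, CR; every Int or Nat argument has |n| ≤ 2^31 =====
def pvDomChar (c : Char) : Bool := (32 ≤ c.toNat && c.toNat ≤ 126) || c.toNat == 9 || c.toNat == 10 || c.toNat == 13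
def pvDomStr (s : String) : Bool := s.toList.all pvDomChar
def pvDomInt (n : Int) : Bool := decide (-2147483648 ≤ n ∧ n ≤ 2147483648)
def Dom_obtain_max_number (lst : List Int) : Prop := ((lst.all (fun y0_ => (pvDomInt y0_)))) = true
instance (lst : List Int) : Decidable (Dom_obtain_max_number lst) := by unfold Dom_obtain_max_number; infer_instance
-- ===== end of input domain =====

-- B replaces A's round-by-round pair-merging simulation by a one-pass grouping of the
-- counts by odd part (each group's total is a binary number whose set bits are the
-- surviving keys), taking each group's extremal surviving key in closed form.


-- ===== PORT A =====
-- one body of A's `for key in data.keys()` loop (tmp[key] -= 2 is written as an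
-- insert of tmp[key] - 2; the key is always present there, so this is exact)
def stepA (data tmp : PySem.Dict Int Int) (key : Int) : PySem.Dict Int Int :=
  if 1 < data.getD key 0 then
    let new_value := key * 2
    let t1 := tmp.insert new_value (tmp.getD new_value 0 + 1)
    t1.insert key (t1.getD key 0 - 2)
  else tmp

-- one iteration of A's while loop (tmp = dict(data); for key in data.keys(): …)
def roundA (data : PySem.Dict Int Int) : PySem.Dict Int Int :=
  data.keys.foldl (stepA data) data

-- the while condition: any(x > 1 for x in data.values())
def condA (d : PySem.Dict Int Int) : Bool := d.values.any (fun x => decide (1 < x))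

-- the while loop; the fuel (never exhausted: the total count drops every iteration,
-- see loopA_spec) only makes the recursion structurally total
def loopA : Nat → PySem.Dict Int Int → PySem.Dict Int Int
  | 0, d => d
  | n + 1, d => if condA d then loopA n (roundA d) else d

def obtain_max_number (lst : List Int) : Int :=
  let data := loopA (lst.length + 1) (PySem.Dict.counter lst)
  (PySem.List.max? (data.keys.filter (fun k => data.getD k 0 == 1)) id).getD 0

-- ===== PORT B =====
-- _split(x): x = odd * 2**e; the `x ≠ 0` test only guards totality (Python's loop
-- is never entered with 0 by B)
def split (x : Int) : Int × Nat :=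
  if h : x ≠ 0 ∧ PySem.Int.mod x 2 = 0 then
    let p := split (PySem.Int.floordiv x 2)
    (p.1, p.2 + 1)
  else (x, 0)
termination_by x.natAbs
decreasing_by
  obtain ⟨hx, he⟩ := h
  rw [PySem.Int.mod_eq_zero_iff_dvd] at he
  obtain ⟨c, rfl⟩ := he
  rw [PySem.Int.floordiv_eq_ediv_of_pos (by omega), Int.mul_ediv_cancel_left c (by omega)]
  have hc : c ≠ 0 := by omega
  have h2 : (2 : Int).natAbs = 2 := rfl
  simp only [Int.natAbs_mul, h2]
  omega

-- o * 2 ** (n.bit_length() - 1) if o > 0 else o * 2 ** _split(n)[1]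
def candB (o n : Int) : Int :=
  if 0 < o then o * 2 ^ (PySem.Int.bitLength n - 1) else o * 2 ^ (split n).2

-- body of B's first loop: two state variables (groups, has_zero)
def bstepB (st : PySem.Dict Int Int × Bool) (x : Int) : PySem.Dict Int Int × Bool :=
  if x = 0 then (st.1, true)
  else
    let p := split x
    (st.1.insert p.1 (st.1.getD p.1 0 + 2 ^ p.2), st.2)

-- body of B's second loop: `if best is None or k > best: best = k`
def bmaxB (b : Option Int) (p : Int × Int) : Option Int :=
  let k := candB p.1 p.2
  match b with
  | none => some k
  | some bb => if bb < k then some k else some bb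

def obtain_max_number_alt (lst : List Int) : Int :=
  let st := lst.foldl bstepB (PySem.Dict.empty, false)
  let best := st.1.items.foldl bmaxB (if st.2 then some 0 else none)
  best.getD 0

-- ===== PRECONDITION & SPEC =====
-- Pre_ excludes only the empty list, on which A raises ValueError (max of empty list).
def Pre_obtain_max_number (lst : List Int) : Prop := lst ≠ []
instance (lst : List Int) : Decidable (Pre_obtain_max_number lst) := by
  unfold Pre_obtain_max_number; infer_instance
def pvWitness_obtain_max_number : List Int := [2, 2, -6, 0, 3]

def Spec_obtain_max_number (lst : List Int) (out : Int) : Prop := out = obtain_max_number_alt lst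
instance (lst : List Int) (out : Int) : Decidable (Spec_obtain_max_number lst out) := by
  unfold Spec_obtain_max_number; infer_instance

-- ===== CLAIM (what is proved, stated in full; the proofs are below) =====
def Claim_equal_obtain_max_number : Prop :=
  ∀ (lst : List Int), Dom_obtain_max_number lst → Pre_obtain_max_number lst →
    Spec_obtain_max_number lst (obtain_max_number lst)

-- ===== LEMMAS AND PROOFS =====

/-! ### facts about `split` (odd part and 2-adic valuation) -/

theorem split_spec_aux : ∀ (n : Nat) (x : Int), x.natAbs ≤ n → x ≠ 0 →
    x = (split x).1 * 2 ^ (split x).2 ∧ ¬ (2 : Int) ∣ (split x).1 := by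
  intro n
  induction n with
  | zero => intro x h hx; exact absurd (by omega : x = 0) hx
  | succ n ih =>
    intro x h hx
    rw [split]
    by_cases hd : PySem.Int.mod x 2 = 0
    · obtain ⟨c, rfl⟩ := (PySem.Int.mod_eq_zero_iff_dvd x 2).1 hd
      have hc : c ≠ 0 := by omega
      have hfd : PySem.Int.floordiv (2 * c) 2 = c := by
        rw [PySem.Int.floordiv_eq_ediv_of_pos (by omega), Int.mul_ediv_cancel_left c (by omega)]
      simp only [hx, hd, ne_eq, not_false_eq_true, and_self, dite_true, hfd]
      have hle : c.natAbs ≤ n := by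
        have : (2 * c).natAbs = 2 * c.natAbs := by
          simp [Int.natAbs_mul]
        omega
      obtain ⟨h1, h2⟩ := ih c hle hc
      refine ⟨?_, h2⟩
      calc 2 * c = 2 * ((split c).1 * 2 ^ (split c).2) := by rw [← h1]
        _ = (split c).1 * 2 ^ ((split c).2 + 1) := by ring
    · simp only [hd, and_false, dite_false]
      refine ⟨by ring, fun hdvd => hd ?_⟩
      exact (PySem.Int.mod_eq_zero_iff_dvd x 2).2 hdvd

theorem split_spec (x : Int) (hx : x ≠ 0) :
    x = (split x).1 * 2 ^ (split x).2 ∧ ¬ (2 : Int) ∣ (split x).1 :=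
  split_spec_aux x.natAbs x le_rfl hx

theorem oddp_ne_zero (x : Int) (hx : x ≠ 0) : (split x).1 ≠ 0 := by
  intro h
  obtain ⟨h1, _⟩ := split_spec x hx
  rw [h, zero_mul] at h1
  exact hx h1

theorem odd_factor_unique {o o' : Int} {e e' : Nat} (ho : ¬ (2:Int) ∣ o) (ho' : ¬ (2:Int) ∣ o')
    (h : o * 2 ^ e = o' * 2 ^ e') : o = o' ∧ e = e' := by
  rcases le_total e e' with hle | hle
  · obtain ⟨k, rfl⟩ := Nat.exists_eq_add_of_le hle
    rw [pow_add] at h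
    have h2 : (2:Int) ^ e ≠ 0 := by positivity
    have ho2 : o = o' * 2 ^ k := by
      have := mul_right_cancel₀ h2 (by linarith [h] : o * 2 ^ e = (o' * 2 ^ k) * 2 ^ e)
      exact this
    rcases Nat.eq_zero_or_pos k with hk | hk
    · subst hk; simp at ho2; omega
    · exfalso; apply ho
      rw [ho2]
      exact Dvd.dvd.mul_left (dvd_pow_self 2 (by omega)) o'
  · obtain ⟨k, rfl⟩ := Nat.exists_eq_add_of_le hle
    rw [pow_add] at h
    have h2 : (2:Int) ^ e' ≠ 0 := by positivity
    have ho2 : o' = o * 2 ^ k := by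
      have := mul_right_cancel₀ h2 (by linarith [h] : o' * 2 ^ e' = (o * 2 ^ k) * 2 ^ e')
      exact this
    rcases Nat.eq_zero_or_pos k with hk | hk
    · subst hk; simp at ho2; omega
    · exfalso; apply ho'
      rw [ho2]
      exact Dvd.dvd.mul_left (dvd_pow_self 2 (by omega)) o

theorem split_eq (o : Int) (e : Nat) (ho : ¬ (2:Int) ∣ o) : split (o * 2 ^ e) = (o, e) := by
  have hne : o ≠ 0 := fun h => ho (by simp [h])
  have hx : o * 2 ^ e ≠ 0 := by
    have : (0:Int) < 2 ^ e := by positivity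
    rcases lt_or_gt_of_ne hne with h | h
    · nlinarith
    · nlinarith
  obtain ⟨h1, h2⟩ := split_spec _ hx
  obtain ⟨ha, hb⟩ := odd_factor_unique h2 ho h1.symm
  exact Prod.ext ha hb

theorem split_double (k : Int) (hk : k ≠ 0) :
    (split (k * 2)).1 = (split k).1 ∧ (split (k * 2)).2 = (split k).2 + 1 := by
  obtain ⟨h1, h2⟩ := split_spec k hk
  have : k * 2 = (split k).1 * 2 ^ ((split k).2 + 1) := by rw [pow_succ]; nlinarith [h1]
  rw [this, split_eq _ _ h2]
  exact ⟨rfl, rfl⟩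


/-! ### the abstract view of a dict state -/

-- weight of key k inside the odd-part group o
def wgt (o k : Int) : Int := if k ≠ 0 ∧ (split k).1 = o then 2 ^ (split k).2 else 0

-- conserved quantity of group o
def Sgrp (o : Int) (d : PySem.Dict Int Int) : Int :=
  ∑ k ∈ d.keys.toFinset, wgt o k * d.getD k 0

-- total count, the termination measure of A's while loop
def TotD (d : PySem.Dict Int Int) : Int := ∑ k ∈ d.keys.toFinset, d.getD k 0

-- the dicts A's loop works on: unique keys, support inside the keys, counts ≥ 0
def GoodD (d : PySem.Dict Int Int) : Prop :=
  d.keys.Nodup ∧ (∀ j : Int, d.getD j 0 ≠ 0 → j ∈ d.keys) ∧ (∀ j : Int, 0 ≤ d.getD j 0)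

theorem wgt_double (o m : Int) : wgt o (m * 2) = 2 * wgt o m := by
  by_cases hm : m = 0
  · simp [hm, wgt]
  · obtain ⟨h1, h2⟩ := split_double m hm
    have hne : m * 2 ≠ 0 := by
      intro h; exact hm (by omega)
    simp only [wgt, h1, h2, hne, hm, ne_eq, not_false_eq_true, true_and]
    by_cases ho : (split m).1 = o
    · simp [ho, pow_succ]; ring
    · simp [ho]

/-! ### pointwise description of one round of A -/

theorem stepA_foldl_getD (d : PySem.Dict Int Int) (K : List Int) (tmp : PySem.Dict Int Int)
    (j : Int) :
    (K.foldl (stepA d) tmp).getD j 0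
      = tmp.getD j 0
        - 2 * (K.countP (fun k => decide (1 < d.getD k 0) && (k == j)) : Int)
        + (K.countP (fun k => decide (1 < d.getD k 0) && (k * 2 == j)) : Int) := by
  induction K generalizing tmp with
  | nil => simp
  | cons k K ih =>
    simp only [List.foldl_cons, List.countP_cons]
    rw [ih]
    by_cases hf : 1 < d.getD k 0
    · simp only [stepA, if_pos hf]
      simp only [PySem.Dict.getD_insert]
      have e1 : (decide (1 < d.getD k 0) && (k == j)) = decide (j = k) := by
        by_cases h : j = k
        · subst h; simp [hf]
        · simp [hf, h]; omega
      have e2 : (decide (1 < d.getD k 0) && (k * 2 == j)) = decide (j = k * 2) := by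
        by_cases h : j = k * 2
        · subst h; simp [hf]
        · simp [hf, h]; omega
      rw [e1, e2]
      simp only [decide_eq_true_eq]
      by_cases hj : j = k
      · subst hj
        by_cases hk0 : j = j * 2
        · have hA : tmp.getD (j * 2) 0 = tmp.getD j 0 := by rw [← hk0]
          rw [hA]
          split_ifs <;> push_cast <;> omega
        · split_ifs <;> push_cast <;> omega
      · by_cases hj2 : j = k * 2
        · subst hj2
          split_ifs <;> push_cast <;> omega
        · split_ifs <;> push_cast <;> omega
    · simp only [stepA, if_neg hf]
      have h1 : (decide (1 < d.getD k 0) && (k == j)) = false := by simp [hf]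
      have h2 : (decide (1 < d.getD k 0) && (k * 2 == j)) = false := by simp [hf]
      rw [h1, h2]
      simp

theorem keys_mono_stepA_foldl (d : PySem.Dict Int Int) (K : List Int)
    (tmp : PySem.Dict Int Int) (j : Int) (hj : j ∈ tmp.keys) :
    j ∈ (K.foldl (stepA d) tmp).keys := by
  induction K generalizing tmp with
  | nil => exact hj
  | cons k K ih =>
    apply ih
    simp only [stepA]
    split
    · simp only [PySem.Dict.mem_keys_insert]
      tauto
    · exact hj

theorem fired_mem_keys (d : PySem.Dict Int Int) (k : Int) (hf : 1 < d.getD k 0) :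
    ∀ (K : List Int), k ∈ K → ∀ (tmp : PySem.Dict Int Int),
      k * 2 ∈ (K.foldl (stepA d) tmp).keys := by
  intro K
  induction K with
  | nil => intro hk; cases hk
  | cons a K ih =>
    intro hk tmp
    rcases List.mem_cons.1 hk with rfl | hk'
    · rw [List.foldl_cons]
      apply keys_mono_stepA_foldl
      rw [stepA, if_pos hf]
      simp only [PySem.Dict.mem_keys_insert]
      tauto
    · exact ih hk' _

theorem nodup_keys_stepA_foldl (d : PySem.Dict Int Int) (K : List Int)
    (tmp : PySem.Dict Int Int) (h : tmp.keys.Nodup) :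
    (K.foldl (stepA d) tmp).keys.Nodup := by
  induction K generalizing tmp with
  | nil => exact h
  | cons k K ih =>
    apply ih
    simp only [stepA]
    split
    · exact PySem.Dict.nodup_keys_insert _ _ _ (PySem.Dict.nodup_keys_insert _ _ _ h)
    · exact h

theorem countP_beq_eq_ite (p : Int → Bool) (j : Int) : ∀ (K : List Int), K.Nodup →
    K.countP (fun k => p k && (k == j)) = if j ∈ K ∧ p j = true then 1 else 0 := by
  intro K
  induction K with
  | nil => simp
  | cons a K ih =>
    intro hK
    rcases List.nodup_cons.1 hK with ⟨ha, hK'⟩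
    rw [List.countP_cons, ih hK']
    by_cases haj : a = j
    · subst haj
      have hm : (a ∈ a :: K ∧ p a = true) ↔ (p a = true) := by simp
      rw [if_congr hm rfl rfl]
      have hm2 : (a ∈ K ∧ p a = true) ↔ False := by simp [ha]
      rw [if_congr hm2 rfl rfl]
      by_cases hp : p a = true <;> simp [hp]
    · have hbe : (a == j) = false := by simp [fun h : a = j => haj h]
      have hmem : (j ∈ a :: K ∧ p j = true) ↔ (j ∈ K ∧ p j = true) := by
        constructor
        · rintro ⟨h, hp⟩
          rcases List.mem_cons.1 h with h' | h'
          · exact absurd h'.symm haj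
          · exact ⟨h', hp⟩
        · rintro ⟨h, hp⟩; exact ⟨List.mem_cons_of_mem _ h, hp⟩
      rw [if_congr hmem rfl rfl, hbe]
      simp

theorem roundA_getD (d : PySem.Dict Int Int) (hG : GoodD d) (j : Int) :
    (roundA d).getD j 0
      = d.getD j 0 - (if 1 < d.getD j 0 then 2 else 0)
        + (if (2:Int) ∣ j ∧ 1 < d.getD (j / 2) 0 then 1 else 0) := by
  obtain ⟨hnd, hsupp, hnn⟩ := hG
  rw [roundA, stepA_foldl_getD]
  have hc1 : (d.keys.countP (fun k => decide (1 < d.getD k 0) && (k == j)))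
      = if 1 < d.getD j 0 then 1 else 0 := by
    rw [countP_beq_eq_ite _ _ _ hnd]
    by_cases h : 1 < d.getD j 0
    · rw [if_pos ⟨hsupp j (by omega), by simp [h]⟩, if_pos h]
    · rw [if_neg, if_neg h]
      rintro ⟨_, hh⟩
      simp only [decide_eq_true_eq] at hh
      exact h hh
  have hc2 : (d.keys.countP (fun k => decide (1 < d.getD k 0) && (k * 2 == j)))
      = if (2:Int) ∣ j ∧ 1 < d.getD (j / 2) 0 then 1 else 0 := by
    by_cases h2 : (2:Int) ∣ j
    · have hcong : ∀ k ∈ d.keys, (decide (1 < d.getD k 0) && (k * 2 == j))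
          = true ↔ (decide (1 < d.getD k 0) && (k == j / 2)) = true := by
        intro k _
        apply Eq.to_iff
        congr 1
        have he : (k * 2 == j) = (k == j / 2) := by
          obtain ⟨c, rfl⟩ := h2
          have hcc : (2 * c) / 2 = c := Int.mul_ediv_cancel_left c (by omega)
          rw [hcc]
          by_cases hkc : k = c
          · subst hkc; simp; omega
          · have : ¬ k * 2 = 2 * c := by omega
            simp [hkc, this]
        rw [he]
      rw [List.countP_congr hcong, countP_beq_eq_ite _ _ _ hnd]
      by_cases h : 1 < d.getD (j / 2) 0
      · rw [if_pos ⟨hsupp _ (by omega), by simp [h]⟩, if_pos ⟨h2, h⟩]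
      · rw [if_neg, if_neg]
        · rintro ⟨_, hh⟩; exact h hh
        · rintro ⟨_, hh⟩
          simp only [decide_eq_true_eq] at hh
          exact h hh
    · have hz : (d.keys.countP (fun k => decide (1 < d.getD k 0) && (k * 2 == j))) = 0 := by
        apply List.countP_eq_zero.mpr
        intro k _
        have : ¬ k * 2 = j := by
          intro h; exact h2 ⟨k, by omega⟩
        simp [this]
      rw [hz, if_neg]
      rintro ⟨hh, _⟩; exact h2 hh
  rw [hc1, hc2]
  split_ifs <;> push_cast <;> omega


theorem goodD_roundA (d : PySem.Dict Int Int) (hG : GoodD d) : GoodD (roundA d) := by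
  obtain ⟨hnd, hsupp, hnn⟩ := hG
  refine ⟨nodup_keys_stepA_foldl _ _ _ hnd, ?_, ?_⟩
  · intro j hj
    by_cases hk : j ∈ d.keys
    · exact keys_mono_stepA_foldl _ _ _ _ hk
    · have h0 : d.getD j 0 = 0 := by
        by_contra h; exact hk (hsupp j h)
      rw [roundA_getD d ⟨hnd, hsupp, hnn⟩ j, h0] at hj
      by_cases hm : (2:Int) ∣ j ∧ 1 < d.getD (j / 2) 0
      · obtain ⟨h2, hfj⟩ := hm
        have := fired_mem_keys d (j / 2) hfj d.keys (hsupp _ (by omega)) d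
        rwa [Int.ediv_mul_cancel h2] at this
      · rw [if_neg hm] at hj
        norm_num at hj
  · intro j
    rw [roundA_getD d ⟨hnd, hsupp, hnn⟩ j]
    have := hnn j
    split_ifs <;> omega

theorem sum_keys_ext (d : PySem.Dict Int Int) (hG : GoodD d) (g : Int → Int) :
    ∑ k ∈ d.keys.toFinset, g k * d.getD k 0
      = ∑ k ∈ (roundA d).keys.toFinset, g k * d.getD k 0 := by
  obtain ⟨hnd, hsupp, hnn⟩ := hG
  apply Finset.sum_subset
  · intro x hx
    simp only [List.mem_toFinset] at *
    exact keys_mono_stepA_foldl _ _ _ _ hx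
  · intro x _ hx
    have h0 : d.getD x 0 = 0 := by
      by_contra h
      exact hx (List.mem_toFinset.mpr (hsupp x h))
    rw [h0, mul_zero]

theorem move_fire_bij (d : PySem.Dict Int Int) (hG : GoodD d) (g : Int → Int)
    (hg : ∀ m : Int, g (m * 2) = 2 * g m) :
    (∑ k ∈ (roundA d).keys.toFinset with (2:Int) ∣ k ∧ 1 < d.getD (k / 2) 0, g k)
      = ∑ k ∈ (roundA d).keys.toFinset with 1 < d.getD k 0, 2 * g k := by
  obtain ⟨hnd, hsupp, hnn⟩ := hG
  refine Finset.sum_bij' (i := fun k _ => k / 2) (j := fun m _ => m * 2)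
    ?_hi ?_hj ?_li ?_ri ?_hval
  case _hi =>
    intro k hk
    simp only [Finset.mem_filter, List.mem_toFinset] at hk ⊢
    obtain ⟨hkU, h2, hf⟩ := hk
    exact ⟨keys_mono_stepA_foldl _ _ _ _ (hsupp _ (by omega)), hf⟩
  case _hj =>
    intro m hm
    simp only [Finset.mem_filter, List.mem_toFinset] at hm ⊢
    obtain ⟨hmU, hf⟩ := hm
    refine ⟨fired_mem_keys d m hf d.keys (hsupp _ (by omega)) d, ⟨m, by ring⟩, ?_⟩
    rwa [Int.mul_ediv_cancel m (by omega)]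
  case _li =>
    intro k hk
    simp only [Finset.mem_filter, List.mem_toFinset] at hk
    exact Int.ediv_mul_cancel hk.2.1
  case _ri =>
    intro m _
    exact Int.mul_ediv_cancel m (by omega)
  case _hval =>
    intro k hk
    simp only [Finset.mem_filter, List.mem_toFinset] at hk
    have h := hg (k / 2)
    rwa [Int.ediv_mul_cancel hk.2.1] at h

theorem Sgrp_roundA (o : Int) (d : PySem.Dict Int Int) (hG : GoodD d) :
    Sgrp o (roundA d) = Sgrp o d := by
  have hGG := hG
  obtain ⟨hnd, hsupp, hnn⟩ := hG
  have hpt : ∀ k ∈ (roundA d).keys.toFinset, wgt o k * (roundA d).getD k 0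
      = wgt o k * d.getD k 0 - (if 1 < d.getD k 0 then 2 * wgt o k else 0)
        + (if (2:Int) ∣ k ∧ 1 < d.getD (k / 2) 0 then wgt o k else 0) := by
    intro k _
    rw [roundA_getD d hGG k]
    split_ifs <;> ring
  rw [Sgrp, Finset.sum_congr rfl hpt, Finset.sum_add_distrib, Finset.sum_sub_distrib]
  rw [← Finset.sum_filter, ← Finset.sum_filter]
  rw [move_fire_bij d hGG (wgt o) (fun m => wgt_double o m)]
  rw [Sgrp, sum_keys_ext d hGG (wgt o)]
  ring

theorem TotD_roundA (d : PySem.Dict Int Int) (hG : GoodD d) (hc : condA d = true) :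
    TotD (roundA d) + 1 ≤ TotD d := by
  have hGG := hG
  obtain ⟨hnd, hsupp, hnn⟩ := hG
  have hpt : ∀ k ∈ (roundA d).keys.toFinset, (roundA d).getD k 0
      = d.getD k 0 - (if 1 < d.getD k 0 then (2:Int) else 0)
        + (if (2:Int) ∣ k ∧ 1 < d.getD (k / 2) 0 then (1:Int) else 0) := by
    intro k _
    rw [roundA_getD d hGG k]
  have hT2 : (∑ k ∈ (roundA d).keys.toFinset, d.getD k 0) = TotD d := by
    have h := sum_keys_ext d hGG (fun _ => (1:Int))
    simp only [one_mul] at h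
    rw [← h, TotD]
  rw [TotD, Finset.sum_congr rfl hpt, Finset.sum_add_distrib, Finset.sum_sub_distrib]
  rw [← Finset.sum_filter, ← Finset.sum_filter, hT2]
  have hW1 : (1:Int) ≤ ∑ _k ∈ (roundA d).keys.toFinset with 1 < d.getD _k 0, (1:Int) := by
    have hex : ∃ k ∈ d.keys, 1 < d.getD k 0 := by
      rw [condA] at hc
      rw [PySem.Dict.values_eq_map_keys d hnd 0] at hc
      simp only [List.any_eq_true, List.mem_map, decide_eq_true_eq] at hc
      obtain ⟨v, ⟨k, hk, rfl⟩, hv⟩ := hc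
      exact ⟨k, hk, hv⟩
    obtain ⟨k, hk, hfk⟩ := hex
    have hkm : k ∈ (roundA d).keys.toFinset.filter (fun k => 1 < d.getD k 0) := by
      rw [Finset.mem_filter]
      exact ⟨List.mem_toFinset.mpr (keys_mono_stepA_foldl _ _ _ _ hk), hfk⟩
    exact Finset.single_le_sum (f := fun _ => (1:Int)) (fun _ _ => by norm_num) hkm
  have hsw : (∑ _k ∈ (roundA d).keys.toFinset with 1 < d.getD _k 0, (2:Int))
      = 2 * (∑ _k ∈ (roundA d).keys.toFinset with 1 < d.getD _k 0, (1:Int)) := by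
    rw [Finset.mul_sum]
    norm_num
  have hVW : (∑ _k ∈ (roundA d).keys.toFinset with (2:Int) ∣ _k ∧ 1 < d.getD (_k / 2) 0, (1:Int))
      ≤ ∑ _k ∈ (roundA d).keys.toFinset with 1 < d.getD _k 0, (1:Int) := by
    rw [Finset.sum_const, Finset.sum_const]
    simp only [nsmul_eq_mul, mul_one]
    have hcard := Finset.card_le_card_of_injOn
      (s := (roundA d).keys.toFinset.filter (fun k => (2:Int) ∣ k ∧ 1 < d.getD (k / 2) 0))
      (t := (roundA d).keys.toFinset.filter (fun k => 1 < d.getD k 0))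
      (fun k => k / 2) ?_ ?_
    · exact_mod_cast hcard
    · intro k hk
      simp only [Finset.coe_filter, Set.mem_setOf_eq, List.mem_toFinset] at hk ⊢
      obtain ⟨hkU, h2, hf⟩ := hk
      exact ⟨keys_mono_stepA_foldl _ _ _ _ (hsupp _ (by omega)), hf⟩
    · intro a ha b hb hab
      simp only [Finset.coe_filter, Set.mem_setOf_eq] at ha hb
      have h1 := Int.ediv_mul_cancel ha.2.1
      have h2 := Int.ediv_mul_cancel hb.2.1
      simp only at hab
      omega
  linarith


theorem condA_false_iff (d : PySem.Dict Int Int) (hnd : d.keys.Nodup)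
    (hsupp : ∀ j : Int, d.getD j 0 ≠ 0 → j ∈ d.keys) :
    condA d = false ↔ ∀ j : Int, d.getD j 0 ≤ 1 := by
  rw [condA, PySem.Dict.values_eq_map_keys d hnd 0]
  simp only [List.any_eq_false, List.mem_map, decide_eq_true_eq, not_lt]
  constructor
  · intro h j
    by_cases hj : j ∈ d.keys
    · exact h _ ⟨j, hj, rfl⟩
    · have : d.getD j 0 = 0 := by
        by_contra hne; exact hj (hsupp j hne)
      omega
  · rintro h v ⟨k, _, rfl⟩
    exact h k

theorem totD_nonneg (d : PySem.Dict Int Int) (hnn : ∀ j : Int, 0 ≤ d.getD j 0) :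
    0 ≤ TotD d :=
  Finset.sum_nonneg (fun k _ => hnn k)

theorem loopA_spec : ∀ (n : Nat) (d : PySem.Dict Int Int), GoodD d → (TotD d).toNat ≤ n →
    GoodD (loopA n d) ∧ condA (loopA n d) = false ∧
      (∀ o : Int, Sgrp o (loopA n d) = Sgrp o d) ∧
      ((0 < (loopA n d).getD 0 0) ↔ (0 < d.getD 0 0)) := by
  intro n
  induction n with
  | zero =>
    intro d hG hT
    obtain ⟨hnd, hsupp, hnn⟩ := hG
    have hT0 : TotD d = 0 := by
      have := totD_nonneg d hnn
      omega
    have hz : ∀ k ∈ d.keys.toFinset, d.getD k 0 = 0 := by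
      rw [TotD] at hT0
      exact (Finset.sum_eq_zero_iff_of_nonneg (fun k _ => hnn k)).1 hT0
    have hall : ∀ j : Int, d.getD j 0 ≤ 1 := by
      intro j
      by_cases hj : j ∈ d.keys
      · rw [hz j (List.mem_toFinset.mpr hj)]; omega
      · have : d.getD j 0 = 0 := by
          by_contra hne; exact hj (hsupp j hne)
        omega
    exact ⟨⟨hnd, hsupp, hnn⟩, (condA_false_iff d hnd hsupp).2 hall,
      fun o => rfl, Iff.rfl⟩
  | succ n ih =>
    intro d hG hT
    by_cases hc : condA d = true
    · have hG' := goodD_roundA d hG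
      have hdec := TotD_roundA d hG hc
      have hnn' : 0 ≤ TotD (roundA d) := totD_nonneg _ hG'.2.2
      have hT' : (TotD (roundA d)).toNat ≤ n := by omega
      obtain ⟨h1, h2, h3, h4⟩ := ih (roundA d) hG' hT'
      have hstep : loopA (n + 1) d = loopA n (roundA d) := by
        rw [loopA, if_pos hc]
      have hz0 : (roundA d).getD 0 0 = d.getD 0 0 - (if 1 < d.getD 0 0 then 1 else 0) := by
        rw [roundA_getD d hG 0]
        have h02 : (2:Int) ∣ 0 := ⟨0, by ring⟩
        have h0d : (0:Int) / 2 = 0 := rfl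
        rw [h0d]
        have hcc : ((2:Int) ∣ 0 ∧ 1 < d.getD 0 0) ↔ (1 < d.getD 0 0) := by simp [h02]
        rw [if_congr hcc rfl rfl]
        split_ifs <;> omega
      refine ⟨hstep ▸ h1, hstep ▸ h2, ?_, ?_⟩
      · intro o
        rw [hstep, h3 o, Sgrp_roundA o d hG]
      · rw [hstep, h4, hz0]
        have := hG.2.2 0
        split_ifs <;> omega
    · have hcf : condA d = false := by
        cases h : condA d
        · rfl
        · exact absurd h hc
      have hstep : loopA (n + 1) d = d := by
        rw [loopA, if_neg hc]
      rw [hstep]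
      exact ⟨hG, hcf, fun o => rfl, Iff.rfl⟩


/-! ### the initial state -/

theorem goodD_counter (lst : List Int) : GoodD (PySem.Dict.counter lst) := by
  refine ⟨PySem.Dict.nodup_keys_counter lst, ?_, ?_⟩
  · intro j hj
    rw [PySem.Dict.getD_counter] at hj
    rw [PySem.Dict.keys_counter]
    have hmem : j ∈ lst := by
      by_contra h
      rw [List.count_eq_zero.mpr h] at hj
      simp at hj
    exact (PySem.Set.mem_ofList _ _).mpr hmem
  · intro j
    rw [PySem.Dict.getD_counter]
    positivity

theorem toFinset_keys_counter (lst : List Int) :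
    (PySem.Dict.counter lst).keys.toFinset = lst.toFinset := by
  ext x
  simp [PySem.Dict.keys_counter, PySem.Set.mem_ofList]

theorem sum_map_one : ∀ (l : List Int), (l.map (fun _ => (1:Int))).sum = l.length := by
  intro l
  induction l with
  | nil => simp
  | cons a l ihl =>
    simp only [List.map_cons, List.sum_cons, ihl, List.length_cons]
    push_cast
    omega

theorem totD_counter (lst : List Int) : TotD (PySem.Dict.counter lst) = lst.length := by
  rw [TotD, toFinset_keys_counter]
  have hs : ∀ k ∈ lst.toFinset, (PySem.Dict.counter lst).getD k 0 = ((lst.count k : Int)) :=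
    fun k _ => PySem.Dict.getD_counter lst k
  rw [Finset.sum_congr rfl hs]
  have h := Finset.sum_list_map_count lst (fun _ => (1:Int))
  simp only [nsmul_eq_mul, mul_one] at h
  rw [← h, sum_map_one lst]

theorem Sgrp_counter (o : Int) (lst : List Int) :
    Sgrp o (PySem.Dict.counter lst) = (lst.map (wgt o)).sum := by
  rw [Sgrp, toFinset_keys_counter]
  have hs : ∀ k ∈ lst.toFinset, wgt o k * (PySem.Dict.counter lst).getD k 0
      = (lst.count k) • wgt o k := by
    intro k _
    rw [PySem.Dict.getD_counter, nsmul_eq_mul]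
    ring
  rw [Finset.sum_congr rfl hs, ← Finset.sum_list_map_count]

/-! ### reading off the final digits -/

theorem digits_unique : ∀ (M : Nat) (g : Nat → Nat) (N : Nat), (∀ e, g e ≤ 1) →
    (∀ e, M ≤ e → g e = 0) → (∑ e ∈ Finset.range M, g e * 2 ^ e) = N →
    ∀ e, g e = (if N.testBit e then 1 else 0) := by
  intro M
  induction M with
  | zero =>
    intro g N h1 h0 hs e
    rw [Finset.range_zero, Finset.sum_empty] at hs
    rw [← hs, Nat.zero_testBit, if_neg (by simp)]
    exact h0 e (Nat.zero_le e)
  | succ M ih =>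
    intro g N h1 h0 hs e
    rw [Finset.sum_range_succ'] at hs
    have hfac : (∑ x ∈ Finset.range M, g (x + 1) * 2 ^ (x + 1))
        = 2 * ∑ x ∈ Finset.range M, g (x + 1) * 2 ^ x := by
      rw [Finset.mul_sum]
      apply Finset.sum_congr rfl
      intro x _
      ring
    have hN : N = 2 * (∑ x ∈ Finset.range M, g (x + 1) * 2 ^ x) + g 0 := by
      rw [← hs, hfac]; ring
    have hg0 := h1 0
    have ih' := ih (fun e => g (e + 1)) (∑ x ∈ Finset.range M, g (x + 1) * 2 ^ x)
      (fun e => h1 (e + 1)) (fun e he => h0 (e + 1) (by omega)) rfl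
    cases e with
    | zero =>
      rw [Nat.testBit_zero]
      by_cases hb : N % 2 = 1 <;> simp [hb] <;> omega
    | succ e =>
      rw [Nat.testBit_add_one]
      have hdiv : N / 2 = ∑ x ∈ Finset.range M, g (x + 1) * 2 ^ x := by omega
      rw [hdiv]
      exact ih' e

theorem le_foldr_max : ∀ (l : List Nat) (x : Nat), x ∈ l → x ≤ l.foldr max 0 := by
  intro l
  induction l with
  | nil => intro x hx; cases hx
  | cons a l ih =>
    intro x hx
    rcases List.mem_cons.1 hx with rfl | hx'
    · exact le_max_left _ _
    · exact le_trans (ih x hx') (le_max_right _ _)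

theorem wgt_nonneg (o k : Int) : 0 ≤ wgt o k := by
  rw [wgt]
  split_ifs
  · positivity
  · exact le_rfl

theorem final_digits (d : PySem.Dict Int Int) (hG : GoodD d) (hle : ∀ j : Int, d.getD j 0 ≤ 1)
    (o : Int) (ho : ¬ (2:Int) ∣ o) (e : Nat) :
    d.getD (o * 2 ^ e) 0 = if ((Sgrp o d).toNat).testBit e then 1 else 0 := by
  obtain ⟨hnd, hsupp, hnn⟩ := hG
  have ho0 : o ≠ 0 := fun h => ho (by rw [h]; exact ⟨0, by ring⟩)
  set M := (d.keys.map (fun k => (split k).2)).foldr max 0 + 1 with hM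
  have hMk : ∀ k ∈ d.keys, (split k).2 < M := by
    intro k hk
    have := le_foldr_max _ ((split k).2) (List.mem_map.mpr ⟨k, hk, by rfl⟩)
    omega
  have hkey : ∀ e' : Nat, (o * 2 ^ e' ∈ d.keys) → e' < M := by
    intro e' hk
    have h := hMk _ hk
    rwa [split_eq o e' ho] at h
  have hout : ∀ e' : Nat, M ≤ e' → d.getD (o * 2 ^ e') 0 = 0 := by
    intro e' he'
    by_contra h
    exact absurd (hkey e' (hsupp _ h)) (by omega)
  have hsum : (∑ x ∈ Finset.range M, d.getD (o * 2 ^ x) 0 * 2 ^ x) = Sgrp o d := by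
    rw [Sgrp]
    have hr : (∑ k ∈ d.keys.toFinset, wgt o k * d.getD k 0)
        = ∑ k ∈ d.keys.toFinset with k ≠ 0 ∧ (split k).1 = o,
            2 ^ (split k).2 * d.getD k 0 := by
      rw [Finset.sum_filter]
      apply Finset.sum_congr rfl
      intro k _
      rw [wgt]
      split_ifs <;> simp
    have hl : (∑ x ∈ Finset.range M, d.getD (o * 2 ^ x) 0 * 2 ^ x)
        = ∑ x ∈ Finset.range M with o * 2 ^ x ∈ d.keys.toFinset,
            d.getD (o * 2 ^ x) 0 * 2 ^ x := by
      symm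
      apply Finset.sum_subset (Finset.filter_subset _ _)
      intro x hx hnx
      have h : d.getD (o * 2 ^ x) 0 = 0 := by
        by_contra h
        exact hnx (Finset.mem_filter.mpr ⟨hx, List.mem_toFinset.mpr (hsupp _ h)⟩)
      rw [h, zero_mul]
    rw [hr, hl]
    refine Finset.sum_bij' (i := fun x _ => o * 2 ^ x) (j := fun k _ => (split k).2)
      ?_ ?_ ?_ ?_ ?_
    · intro x hx
      simp only [Finset.mem_filter, Finset.mem_range, List.mem_toFinset] at hx ⊢
      refine ⟨hx.2, mul_ne_zero ho0 (by positivity), ?_⟩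
      rw [split_eq o x ho]
    · intro k hk
      simp only [Finset.mem_filter, Finset.mem_range, List.mem_toFinset] at hk ⊢
      obtain ⟨hkk, hk0, hko⟩ := hk
      have hdec := (split_spec k hk0).1
      refine ⟨?_, ?_⟩
      · exact hMk k hkk
      · rw [← hko, ← hdec]; exact hkk
    · intro x hx
      show (split (o * 2 ^ x)).2 = x
      rw [split_eq o x ho]
    · intro k hk
      simp only [Finset.mem_filter, List.mem_toFinset] at hk
      obtain ⟨hkk, hk0, hko⟩ := hk
      show o * 2 ^ (split k).2 = k
      rw [← hko]
      exact ((split_spec k hk0).1).symm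
    · intro x hx
      show d.getD (o * 2 ^ x) 0 * 2 ^ x = 2 ^ (split (o * 2 ^ x)).2 * d.getD (o * 2 ^ x) 0
      rw [split_eq o x ho]
      ring
  have hSnn : 0 ≤ Sgrp o d :=
    Finset.sum_nonneg (fun k _ => mul_nonneg (wgt_nonneg o k) (hnn k))
  have hgsum : (∑ x ∈ Finset.range M, (d.getD (o * 2 ^ x) 0).toNat * 2 ^ x)
      = (Sgrp o d).toNat := by
    have hcast : ((∑ x ∈ Finset.range M, (d.getD (o * 2 ^ x) 0).toNat * 2 ^ x : Nat) : Int)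
        = Sgrp o d := by
      push_cast
      rw [← hsum]
      apply Finset.sum_congr rfl
      intro x _
      rw [Int.toNat_of_nonneg (hnn (o * 2 ^ x))]
    omega
  have hfin := digits_unique M (fun x => (d.getD (o * 2 ^ x) 0).toNat) ((Sgrp o d).toNat)
    (fun x => by simp only []; have := hle (o * 2 ^ x); have := hnn (o * 2 ^ x); omega)
    (fun x hx => by simp only []; rw [hout x hx]; rfl) hgsum e
  have hnne := hnn (o * 2 ^ e)
  rw [← Int.toNat_of_nonneg hnne, hfin]
  split_ifs <;> rfl


/-! ### B's first pass: grouping by odd part -/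

theorem bstepB_foldl (lst : List Int) : ∀ (st : PySem.Dict Int Int × Bool),
    ((lst.foldl bstepB st).2 = (st.2 || lst.any (fun x => x == 0)))
    ∧ (∀ o : Int, (lst.foldl bstepB st).1.getD o 0 = st.1.getD o 0 + (lst.map (wgt o)).sum)
    ∧ (∀ o : Int, o ∈ (lst.foldl bstepB st).1.keys ↔
        (o ∈ st.1.keys ∨ ∃ x ∈ lst, x ≠ 0 ∧ (split x).1 = o))
    ∧ (st.1.keys.Nodup → (lst.foldl bstepB st).1.keys.Nodup) := by
  induction lst with
  | nil => intro st; simp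
  | cons a lst ih =>
    intro st
    rw [List.foldl_cons]
    obtain ⟨ih1, ih2, ih3, ih4⟩ := ih (bstepB st a)
    by_cases ha : a = 0
    · subst ha
      have hb : bstepB st 0 = (st.1, true) := by rw [bstepB, if_pos rfl]
      refine ⟨?_, ?_, ?_, ?_⟩
      · rw [ih1, hb]; simp
      · intro o
        rw [ih2 o, hb]
        have : wgt o 0 = 0 := by rw [wgt]; simp
        simp [this]
      · intro o
        rw [ih3 o, hb]
        constructor
        · rintro (h | ⟨x, hx, hx0, hxo⟩)
          · exact Or.inl h
          · exact Or.inr ⟨x, List.mem_cons_of_mem _ hx, hx0, hxo⟩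
        · rintro (h | ⟨x, hx, hx0, hxo⟩)
          · exact Or.inl h
          · rcases List.mem_cons.1 hx with rfl | hx'
            · exact absurd rfl hx0
            · exact Or.inr ⟨x, hx', hx0, hxo⟩
      · intro h; exact ih4 (by rw [hb]; exact h)
    · have hb : bstepB st a
          = (st.1.insert (split a).1 (st.1.getD (split a).1 0 + 2 ^ (split a).2), st.2) := by
        rw [bstepB, if_neg ha]
      refine ⟨?_, ?_, ?_, ?_⟩
      · rw [ih1, hb]
        have : (a == 0) = false := by simp [ha]
        simp [this]
      · intro o
        rw [ih2 o, hb]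
        simp only [List.map_cons, List.sum_cons]
        rw [PySem.Dict.getD_insert]
        have hw : wgt o a = if o = (split a).1 then (2:Int) ^ (split a).2 else 0 := by
          rw [wgt]
          by_cases h : (split a).1 = o
          · rw [if_pos ⟨ha, h⟩, if_pos h.symm]
          · rw [if_neg (by tauto), if_neg (fun hh => h hh.symm)]
        rw [hw]
        split_ifs with h
        · rw [h]; ring
        · ring
      · intro o
        rw [ih3 o, hb]
        simp only [PySem.Dict.mem_keys_insert]
        constructor
        · rintro ((h | h) | ⟨x, hx, hx0, hxo⟩)
          · exact Or.inr ⟨a, List.mem_cons_self .., ha, h.symm⟩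
          · exact Or.inl h
          · exact Or.inr ⟨x, List.mem_cons_of_mem _ hx, hx0, hxo⟩
        · rintro (h | ⟨x, hx, hx0, hxo⟩)
          · exact Or.inl (Or.inr h)
          · rcases List.mem_cons.1 hx with rfl | hx'
            · exact Or.inl (Or.inl hxo.symm)
            · exact Or.inr ⟨x, hx', hx0, hxo⟩
      · intro h
        apply ih4
        rw [hb]
        exact PySem.Dict.nodup_keys_insert _ _ _ h

/-! ### B's second pass: running maximum over the group candidates -/

theorem bmaxB_some : ∀ (L : List (Int × Int)) (y : Int),
    ∃ m : Int, L.foldl bmaxB (some y) = some m := by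
  intro L
  induction L with
  | nil => intro y; exact ⟨y, rfl⟩
  | cons p L ih =>
    intro y
    rw [List.foldl_cons]
    have : ∃ z : Int, bmaxB (some y) p = some z := by
      rw [bmaxB]
      by_cases h : y < candB p.1 p.2
      · exact ⟨candB p.1 p.2, by simp [h]⟩
      · exact ⟨y, by simp [h]⟩
    obtain ⟨z, hz⟩ := this
    rw [hz]
    exact ih z

theorem bmaxB_foldl : ∀ (L : List (Int × Int)) (b : Option Int) (m : Int),
    L.foldl bmaxB b = some m →
      ((b = some m ∨ ∃ p ∈ L, candB p.1 p.2 = m)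
        ∧ (∀ y : Int, b = some y → y ≤ m) ∧ (∀ p ∈ L, candB p.1 p.2 ≤ m)) := by
  intro L
  induction L with
  | nil =>
    intro b m h
    simp only [List.foldl_nil] at h
    exact ⟨Or.inl h, fun y hy => by rw [hy] at h; cases h; exact le_rfl,
      fun p hp => absurd hp (List.not_mem_nil)⟩
  | cons p L ih =>
    intro b m h
    rw [List.foldl_cons] at h
    obtain ⟨h1, h2, h3⟩ := ih (bmaxB b p) m h
    have hstep : (bmaxB b p = some (candB p.1 p.2)) ∨
        (∃ bb : Int, b = some bb ∧ bmaxB b p = some bb ∧ candB p.1 p.2 ≤ bb) := by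
      cases b with
      | none => exact Or.inl rfl
      | some bb =>
        by_cases hlt : bb < candB p.1 p.2
        · exact Or.inl (by simp [bmaxB, hlt])
        · exact Or.inr ⟨bb, rfl, by simp [bmaxB, hlt], by omega⟩
    refine ⟨?_, ?_, ?_⟩
    · rcases hstep with hs | ⟨bb, hbb, hs, hle⟩
      · rcases h1 with h1 | ⟨q, hq, hqm⟩
        · rw [hs] at h1
          exact Or.inr ⟨p, List.mem_cons_self .., by cases h1; rfl⟩
        · exact Or.inr ⟨q, List.mem_cons_of_mem _ hq, hqm⟩
      · rcases h1 with h1 | ⟨q, hq, hqm⟩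
        · rw [hs] at h1
          rw [hbb, h1]
          exact Or.inl rfl
        · exact Or.inr ⟨q, List.mem_cons_of_mem _ hq, hqm⟩
    · intro y hy
      by_cases hlt : y < candB p.1 p.2
      · have hz : bmaxB b p = some (candB p.1 p.2) := by rw [hy]; simp [bmaxB, hlt]
        have := h2 _ hz
        omega
      · have hz : bmaxB b p = some y := by rw [hy]; simp [bmaxB, hlt]
        exact h2 _ hz
    · intro q hq
      rcases List.mem_cons.1 hq with rfl | hq'
      · rcases hstep with hs | ⟨bb, hbb, hs, hle⟩
        · exact h2 _ hs
        · exact le_trans hle (h2 _ hs)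
      · exact h3 q hq' 


/-! ### the candidate of a group is its largest surviving key -/

theorem pow_le_pow_two_int {m n : Nat} (h : m ≤ n) : (2:Int) ^ m ≤ 2 ^ n := by
  gcongr
  omega

theorem candB_top (o n : Int) (ho : 0 < o) (hn : 0 < n) :
    candB o n = o * 2 ^ (PySem.Int.bitLength n - 1)
    ∧ (n.toNat).testBit (PySem.Int.bitLength n - 1) = true
    ∧ (∀ e : Nat, (n.toNat).testBit e = true → o * 2 ^ e ≤ candB o n) := by
  have hcand : candB o n = o * 2 ^ (PySem.Int.bitLength n - 1) := by
    rw [candB, if_pos ho]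
  have hNa : n.natAbs = n.toNat := by omega
  have hlt : n.toNat < 2 ^ PySem.Int.bitLength n := by
    have h := PySem.Int.lt_two_pow_bitLength n
    rwa [hNa] at h
  have hge : 2 ^ (PySem.Int.bitLength n - 1) ≤ n.toNat := by
    have h := PySem.Int.two_pow_bitLength_le n (by omega)
    rwa [hNa] at h
  have hl1 : 1 ≤ PySem.Int.bitLength n := by
    by_contra h
    have h0 : PySem.Int.bitLength n = 0 := by omega
    rw [h0, pow_zero] at hlt
    omega
  have hdiv : n.toNat / 2 ^ (PySem.Int.bitLength n - 1) = 1 := by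
    apply Nat.div_eq_of_lt_le (by omega)
    have h2 : (1 + 1) * 2 ^ (PySem.Int.bitLength n - 1) = 2 ^ PySem.Int.bitLength n := by
      have h3 : PySem.Int.bitLength n - 1 + 1 = PySem.Int.bitLength n := by omega
      calc (1 + 1) * 2 ^ (PySem.Int.bitLength n - 1)
          = 2 ^ (PySem.Int.bitLength n - 1) * 2 := by ring
        _ = 2 ^ (PySem.Int.bitLength n - 1 + 1) := (pow_succ 2 _).symm
        _ = 2 ^ PySem.Int.bitLength n := by rw [h3]
    omega
  refine ⟨hcand, ?_, ?_⟩
  · rw [Nat.testBit_eq_decide_div_mod_eq, hdiv]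
    rfl
  · intro e htb
    have he : e ≤ PySem.Int.bitLength n - 1 := by
      by_contra h
      have h2 : n.toNat < 2 ^ e := by
        calc n.toNat < 2 ^ PySem.Int.bitLength n := hlt
          _ ≤ 2 ^ e := Nat.pow_le_pow_right (by omega) (by omega)
      rw [Nat.testBit_lt_two_pow h2] at htb
      cases htb
    rw [hcand]
    have h2 := pow_le_pow_two_int he
    nlinarith

theorem candB_bot (o n : Int) (ho : o < 0) (hn : 0 < n) :
    candB o n = o * 2 ^ (split n).2
    ∧ (n.toNat).testBit ((split n).2) = true
    ∧ (∀ e : Nat, (n.toNat).testBit e = true → o * 2 ^ e ≤ candB o n) := by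
  have hcand : candB o n = o * 2 ^ (split n).2 := by
    rw [candB, if_neg (by omega)]
  obtain ⟨hdec, hodd⟩ := split_spec n (by omega)
  set d := (split n).1 with hd
  set t := (split n).2 with ht
  have hdpos : 0 < d := by
    rcases lt_trichotomy d 0 with h | h | h
    · have h2 : (0:Int) < 2 ^ t := by positivity
      nlinarith
    · rw [h, zero_mul] at hdec; omega
    · exact h
  have hN : n.toNat = d.toNat * 2 ^ t := by
    have hcast : ((d.toNat * 2 ^ t : Nat) : Int) = n := by
      push_cast
      rw [Int.toNat_of_nonneg (by omega)]
      exact hdec.symm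
    omega
  have hdm : d.toNat % 2 = 1 := by
    have h2 : ¬ (2:Int) ∣ d := hodd
    omega
  refine ⟨hcand, ?_, ?_⟩
  · rw [Nat.testBit_eq_decide_div_mod_eq, hN, Nat.mul_div_cancel _ (by positivity)]
    simp [hdm]
  · intro e htb
    have he : t ≤ e := by
      by_contra h
      have hsplit : n.toNat = (d.toNat * 2 ^ (t - e)) * 2 ^ e := by
        rw [hN, mul_assoc, ← pow_add]
        have h4 : t - e + e = t := by omega
        rw [h4]
      have hdivq : n.toNat / 2 ^ e = d.toNat * 2 ^ (t - e) := by
        rw [hsplit, Nat.mul_div_cancel _ (by positivity)]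
      have heven : (d.toNat * 2 ^ (t - e)) % 2 = 0 := by
        have h1 : t - e = (t - e - 1) + 1 := by omega
        have h2 : d.toNat * 2 ^ (t - e) = 2 * (d.toNat * 2 ^ (t - e - 1)) := by
          calc d.toNat * 2 ^ (t - e) = d.toNat * 2 ^ (t - e - 1 + 1) := by rw [← h1]
            _ = d.toNat * (2 ^ (t - e - 1) * 2) := by rw [pow_succ]
            _ = 2 * (d.toNat * 2 ^ (t - e - 1)) := by ring
        omega
      rw [Nat.testBit_eq_decide_div_mod_eq, hdivq] at htb
      simp [heven] at htb
    rw [hcand]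
    exact mul_le_mul_of_nonpos_left (pow_le_pow_two_int he) (by omega)

theorem obtain_max_number_spec : Claim_equal_obtain_max_number := by
  intro lst _hdom hpre
  unfold Spec_obtain_max_number
  simp only [obtain_max_number, obtain_max_number_alt]
  -- A-side final state
  have hG0 := goodD_counter lst
  have hT0 : (TotD (PySem.Dict.counter lst)).toNat ≤ lst.length + 1 := by
    rw [totD_counter]; omega
  obtain ⟨hGs, hcs, hS, hz⟩ := loopA_spec (lst.length + 1) (PySem.Dict.counter lst) hG0 hT0
  set ds := loopA (lst.length + 1) (PySem.Dict.counter lst) with hds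
  obtain ⟨hnd, hsupp, hnn⟩ := hGs
  have hle : ∀ j : Int, ds.getD j 0 ≤ 1 := (condA_false_iff ds hnd hsupp).1 hcs
  -- B-side grouping state
  obtain ⟨st2, stg, stk, stnd0⟩ := bstepB_foldl lst (PySem.Dict.empty, false)
  set st := lst.foldl bstepB (PySem.Dict.empty, false) with hst
  have stnd : st.1.keys.Nodup := stnd0 (by simp)
  have hgro : ∀ o : Int, st.1.getD o 0 = Sgrp o (PySem.Dict.counter lst) := by
    intro o
    rw [stg o, Sgrp_counter]
    simp
  have hzero2 : st.2 = lst.any (fun x => x == 0) := by rw [st2]; simp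
  have hitems : st.1.items = st.1.keys.map (fun k => (k, st.1.getD k 0)) :=
    PySem.Dict.items_eq_map_keys st.1 stnd 0
  have stk' : ∀ o : Int, o ∈ st.1.keys ↔ ∃ x ∈ lst, x ≠ 0 ∧ (split x).1 = o := by
    intro o
    rw [stk o]
    simp
  -- survivors: the zero key
  have hP0 : ds.getD 0 0 = 1 ↔ 0 ∈ lst := by
    have hc0 : (PySem.Dict.counter lst).getD 0 0 = ((lst.count 0 : Int)) :=
      PySem.Dict.getD_counter lst 0
    constructor
    · intro h
      have h2 := hz.1 (by omega)
      rw [hc0] at h2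
      have h3 : 0 < lst.count 0 := by exact_mod_cast h2
      exact List.count_pos_iff.mp h3
    · intro h
      have hcnt : 0 < lst.count 0 := List.count_pos_iff.mpr h
      have h2 := hz.2 (by rw [hc0]; exact_mod_cast hcnt)
      have h1 := hle 0
      omega
  -- survivors: the nonzero keys are the set bits of the group totals
  have hPd : ∀ (o : Int), ¬ (2:Int) ∣ o → ∀ e : Nat,
      (ds.getD (o * 2 ^ e) 0 = 1
        ↔ ((Sgrp o (PySem.Dict.counter lst)).toNat).testBit e = true) := by
    intro o ho e
    have h := final_digits ds ⟨hnd, hsupp, hnn⟩ hle o ho e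
    rw [hS o] at h
    rw [h]
    split_ifs with hbit
    · simp [hbit]
    · simp [hbit]
  -- every group in B's dict has a positive total and an odd key
  have hkeyN : ∀ o : Int, o ∈ st.1.keys → 0 < st.1.getD o 0 := by
    intro o hkeys
    obtain ⟨x, hx, hx0, hxo⟩ := (stk' o).1 hkeys
    rw [stg o]
    have hwx : wgt o x = 2 ^ (split x).2 := by rw [wgt, if_pos ⟨hx0, hxo⟩]
    have hterm : wgt o x ≤ (lst.map (wgt o)).sum := by
      apply List.single_le_sum
      · intro y hy
        obtain ⟨x', _, rfl⟩ := List.mem_map.1 hy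
        exact wgt_nonneg o x'
      · exact List.mem_map_of_mem hx
    have hpow : (0:Int) < 2 ^ (split x).2 := by positivity
    simp only [PySem.Dict.getD_empty, zero_add]
    omega
  have hoddk : ∀ o : Int, o ∈ st.1.keys → ¬ (2:Int) ∣ o := by
    intro o hkeys
    obtain ⟨x, hx, hx0, hxo⟩ := (stk' o).1 hkeys
    rw [← hxo]
    exact (split_spec x hx0).2
  -- each group's candidate survives
  have hPcand : ∀ o : Int, o ∈ st.1.keys → ds.getD (candB o (st.1.getD o 0)) 0 = 1 := by
    intro o hkeys
    have hng := hkeyN o hkeys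
    have ho := hoddk o hkeys
    have ho0 : o ≠ 0 := fun h => ho (by rw [h]; exact ⟨0, by ring⟩)
    rcases lt_or_gt_of_ne ho0 with hneg | hpos
    · obtain ⟨hc, htb, _⟩ := candB_bot o (st.1.getD o 0) hneg hng
      rw [hc]
      exact (hPd o ho _).2 (by rw [← hgro o]; exact htb)
    · obtain ⟨hc, htb, _⟩ := candB_top o (st.1.getD o 0) hpos hng
      rw [hc]
      exact (hPd o ho _).2 (by rw [← hgro o]; exact htb)
  -- each nonzero survivor is bounded by its group's candidate
  have hPbound : ∀ j : Int, j ≠ 0 → ds.getD j 0 = 1 →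
      (split j).1 ∈ st.1.keys ∧ j ≤ candB ((split j).1) (st.1.getD (split j).1 0) := by
    intro j hj0 hPj
    obtain ⟨hdec, hodd⟩ := split_spec j hj0
    have htb : ((Sgrp (split j).1 (PySem.Dict.counter lst)).toNat).testBit (split j).2
        = true := by
      apply (hPd _ hodd _).1
      rw [← hdec]
      exact hPj
    have hsne : Sgrp (split j).1 (PySem.Dict.counter lst) ≠ 0 := by
      intro h
      rw [h] at htb
      simp [Nat.zero_testBit] at htb
    have hex : ∃ x ∈ lst, x ≠ 0 ∧ (split x).1 = (split j).1 := by
      by_contra h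
      push Not at h
      apply hsne
      rw [Sgrp_counter]
      apply List.sum_eq_zero
      intro y hy
      obtain ⟨x, hx, rfl⟩ := List.mem_map.1 hy
      rw [wgt, if_neg]
      rintro ⟨hx0, hxo⟩
      exact (h x hx hx0) hxo
    have hkeys : (split j).1 ∈ st.1.keys := (stk' _).2 hex
    refine ⟨hkeys, ?_⟩
    have hng := hkeyN _ hkeys
    have ho0 : (split j).1 ≠ 0 := oddp_ne_zero j hj0
    have htb' : ((st.1.getD (split j).1 0).toNat).testBit (split j).2 = true := by
      rw [hgro]; exact htb
    rcases lt_or_gt_of_ne ho0 with hneg | hpos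
    · obtain ⟨_, _, hmax⟩ := candB_bot _ _ hneg hng
      have h := hmax _ htb'
      rwa [← hdec] at h
    · obtain ⟨_, _, hmax⟩ := candB_top _ _ hpos hng
      have h := hmax _ htb'
      rwa [← hdec] at h
  -- B's fold returns a value
  have hbex : ∃ b : Int,
      st.1.items.foldl bmaxB (if st.2 then some 0 else none) = some b := by
    by_cases h2 : st.2 = true
    · rw [if_pos h2]
      exact bmaxB_some _ 0
    · obtain ⟨x, hx⟩ := List.exists_mem_of_ne_nil lst hpre
      have hx0 : x ≠ 0 := by
        intro h
        apply h2
        rw [hzero2]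
        exact List.any_eq_true.mpr ⟨x, hx, by simp [h]⟩
      have hkeys : (split x).1 ∈ st.1.keys := (stk' _).2 ⟨x, hx, hx0, rfl⟩
      cases hit : st.1.items with
      | nil =>
        exfalso
        rw [hitems, List.map_eq_nil_iff] at hit
        rw [hit] at hkeys
        cases hkeys
      | cons p ps =>
        rw [List.foldl_cons, if_neg h2]
        exact bmaxB_some ps (candB p.1 p.2)
  obtain ⟨b, hb⟩ := hbex
  obtain ⟨hb1, hb2, hb3⟩ := bmaxB_foldl _ _ _ hb
  -- b itself survives
  have hPb : ds.getD b 0 = 1 := by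
    rcases hb1 with hb0 | ⟨p, hp, hcand⟩
    · by_cases h2 : st.2 = true
      · rw [if_pos h2] at hb0
        have hbz : b = 0 := by cases hb0; rfl
        subst hbz
        apply hP0.2
        rw [hzero2] at h2
        obtain ⟨x, hx, hxx⟩ := List.any_eq_true.mp h2
        have : x = 0 := by simpa using hxx
        rwa [this] at hx
      · rw [if_neg h2] at hb0
        cases hb0
    · obtain ⟨o, hko, rfl⟩ : ∃ o ∈ st.1.keys, p = (o, st.1.getD o 0) := by
        rw [hitems] at hp
        obtain ⟨o, ho, rfl⟩ := List.mem_map.1 hp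
        exact ⟨o, ho, rfl⟩
      rw [← hcand]
      exact hPcand o hko
  -- b dominates every survivor
  have hPub : ∀ j : Int, ds.getD j 0 = 1 → j ≤ b := by
    intro j hPj
    by_cases hj0 : j = 0
    · subst hj0
      have h0l : 0 ∈ lst := hP0.1 hPj
      have h2 : st.2 = true := by
        rw [hzero2]
        exact List.any_eq_true.mpr ⟨0, h0l, by simp⟩
      exact hb2 0 (by rw [if_pos h2])
    · obtain ⟨hkeys, hle2⟩ := hPbound j hj0 hPj
      have hp : ((split j).1, st.1.getD (split j).1 0) ∈ st.1.items := by
        rw [hitems]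
        exact List.mem_map_of_mem hkeys
      exact le_trans hle2 (hb3 _ hp)
  -- A's max over the survivors equals b
  set L := ds.keys.filter (fun k => ds.getD k 0 == 1) with hL
  have hLmem : ∀ j : Int, j ∈ L ↔ ds.getD j 0 = 1 := by
    intro j
    rw [hL, List.mem_filter]
    constructor
    · rintro ⟨_, hj⟩
      simpa using hj
    · intro hj
      exact ⟨hsupp j (by omega), by simp [hj]⟩
  have hbL : b ∈ L := (hLmem b).2 hPb
  have hmax : ∃ m : Int, PySem.List.max? L id = some m := by
    cases hm : PySem.List.max? L id with
    | some m => exact ⟨m, rfl⟩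
    | none =>
      rw [PySem.List.max?_eq_none_iff] at hm
      rw [hm] at hbL
      cases hbL
  obtain ⟨m, hm⟩ := hmax
  have hmL : m ∈ L := PySem.List.max?_mem hm
  have hmb : m = b := by
    apply le_antisymm (hPub m ((hLmem m).1 hmL))
    have h := PySem.List.max?_isMax hm b hbL
    simpa using h
  rw [hm, hb, hmb]
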